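-- pv_equiv track=rewrite | github.com/ahosanul/project_wiki | erp-wiki-mcp/src/erp_wiki_mcp/parsers/properties_parser.py | _unescape_value
-- ===== SOURCE A (Python) =====
-- def _unescape_value(value: str) -> str:
--     """Unescape Java properties value."""
--     if not value:
--         return ''
--
--     # Handle common escape sequences
--     result = []
--     i = 0
--     while i < len(value):
--         char = value[i]
--
--         if char == '\\' and i + 1 < len(value):
--             next_char = value[i + 1]
--             if next_char == 'n':
--                 result.append('\n')
--                 i += 2
--                 continue
--             elif next_char == 'r':
--                 result.append('\r')
--                 i += 2
--                 continue
--             elif next_char == 't':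
--                 result.append('\t')
--                 i += 2
--                 continue
--             elif next_char == 'f':
--                 result.append('\f')
--                 i += 2
--                 continue
--             elif next_char == '\\':
--                 result.append('\\')
--                 i += 2
--                 continue
--             elif next_char == ':':
--                 result.append(':')
--                 i += 2
--                 continue
--             elif next_char == '=':
--                 result.append('=')
--                 i += 2
--                 continue
--             elif next_char == 'u' and i + 5 < len(value):
--                 # Unicode escape \uXXXX
--                 try:
--                     unicode_val = int(value[i + 2:i + 6], 16)
--                     result.append(chr(unicode_val))
--                     i += 6
--                     continue
--                 except ValueError:
--                     pass
--
--         result.append(char)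
--         i += 1
--
--     return ''.join(result).strip()
-- ===== SOURCE B (Python) =====
-- _SIMPLE = {'n': '\n', 'r': '\r', 't': '\t', 'f': '\f', '\\': '\\', ':': ':', '=': '='}
--
--
-- def _unescape_value(value: str) -> str:
--     """Unescape Java properties value."""
--     out = []
--     rest = value
--     while True:
--         pos = rest.find('\\')
--         if pos == -1 or pos == len(rest) - 1:
--             out.append(rest)
--             break
--         out.append(rest[:pos])
--         nxt = rest[pos + 1]
--         if nxt in _SIMPLE:
--             out.append(_SIMPLE[nxt])
--             rest = rest[pos + 2:]
--         elif nxt == 'u' and pos + 5 < len(rest):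
--             try:
--                 out.append(chr(int(rest[pos + 2:pos + 6], 16)))
--                 rest = rest[pos + 6:]
--             except ValueError:
--                 out.append('\\')
--                 rest = rest[pos + 1:]
--         else:
--             out.append('\\')
--             rest = rest[pos + 1:]
--     return ''.join(out).strip()
-- ===== Notes on version B (the rewrite author's own statement) =====
-- stated objective: faster
-- what changed: Replaced A's per-character while loop (one append per character down the elif ladder) with a find-based chunk copier that locates the next backslash with str.find, copies the whole literal run in one slice, decodes one escape per iteration via a module-level dict; Pre_ only excludes values containing a \uXXXX escape whose hex value is a UTF-16 surrogate (0xD800-0xDFFF), where Python's chr yields a lone surrogate that is not a Unicode scalar value and so not representable in the Lean port's String type (both Pythons agree there).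
-- outside the precondition, e.g. on _unescape_value('\\\\ud800'): A returns '\\ud800', B returns '\\ud800'
import Mathlib
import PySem

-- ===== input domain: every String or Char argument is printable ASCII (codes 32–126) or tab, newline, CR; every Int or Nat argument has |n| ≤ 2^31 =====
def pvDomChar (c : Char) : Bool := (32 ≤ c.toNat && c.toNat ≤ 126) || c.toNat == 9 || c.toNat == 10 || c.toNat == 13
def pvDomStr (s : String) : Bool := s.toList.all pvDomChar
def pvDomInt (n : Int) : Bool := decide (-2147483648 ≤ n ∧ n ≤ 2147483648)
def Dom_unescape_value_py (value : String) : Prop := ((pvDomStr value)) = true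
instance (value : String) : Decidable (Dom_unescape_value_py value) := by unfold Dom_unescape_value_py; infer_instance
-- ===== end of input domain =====

-- B rewrites A's per-character scan as a find-based chunk copier (copy whole literal runs
-- between backslashes in one slice, decode one escape per iteration); return value only, no mutation.

-- ===== PORT A =====

-- shared escape decoder: int(value[i+2:i+6], 16) then chr(...); ValueError (none) when the
-- 4-char slice is not a base-16 int or the int is negative (chr raises) — exact on Pre_
-- (Pre_ excludes surrogate results, which Python's chr allows but Unicode scalars exclude).
def pvDecodeU (cs : List Char) : Option Char :=
  match PySem.Int.ofCharsBase? cs 16 with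
  | some v => if 0 ≤ v then some (Char.ofNat v.toNat) else none
  | none => none

-- A's while loop: one character per step; on '\' with a following char, the elif ladder.
def unescapeLoopA : List Char → List Char
  | [] => []
  | c :: rest =>
    if c = '\\' then
      match rest with
      | next :: rest' =>
        if next = 'n' then '\n' :: unescapeLoopA rest'
        else if next = 'r' then '\r' :: unescapeLoopA rest'
        else if next = 't' then '\t' :: unescapeLoopA rest'
        else if next = 'f' then Char.ofNat 12 :: unescapeLoopA rest'
        else if next = '\\' then '\\' :: unescapeLoopA rest'
        else if next = ':' then ':' :: unescapeLoopA rest'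
        else if next = '=' then '=' :: unescapeLoopA rest'
        else if next = 'u' ∧ 4 ≤ rest'.length then  -- i + 5 < len(value)
          match pvDecodeU (rest'.take 4) with       -- value[i+2:i+6]
          | some ch => ch :: unescapeLoopA (rest'.drop 4)      -- i += 6
          | none => '\\' :: unescapeLoopA (next :: rest')      -- fall through: append char, i += 1
        else '\\' :: unescapeLoopA (next :: rest')             -- unknown escape: append char, i += 1
      | [] => c :: unescapeLoopA []   -- i + 1 < len(value) fails: append char, i += 1
    else c :: unescapeLoopA rest
  termination_by cs => cs.length
  decreasing_by all_goals (simp_all; try omega)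

def unescape_value_py (value : String) : String :=
  if value.toList = [] then ""      -- if not value: return ''
  else String.mk (PySem.Chars.strip (unescapeLoopA value.toList))

-- ===== PORT B =====

-- the module-level _SIMPLE dict of Source B
def pvSimple : PySem.Dict Char Char :=
  PySem.Dict.ofList [('n', '\n'), ('r', '\r'), ('t', '\t'), ('f', Char.ofNat 12),
                     ('\\', '\\'), (':', ':'), ('=', '=')]

-- Source B's loop: find the next backslash, copy the literal chunk in one slice, decode one escape.
def unescapeLoopB (rest : List Char) : List Char :=
  let pos := PySem.Chars.find rest ['\\']
  if h : pos = -1 ∨ pos = (rest.length : Int) - 1 then rest      -- out.append(rest); break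
  else
    let pre := PySem.List.slice rest none (some pos)             -- rest[:pos]
    match PySem.List.pyGet? rest (pos + 1) with                  -- rest[pos+1] (in range here)
    | none => pre
    | some nxt =>
      match PySem.Dict.get? pvSimple nxt with
      | some rep => pre ++ rep :: unescapeLoopB (PySem.List.slice rest (some (pos + 2)) none)
      | none =>
        if nxt = 'u' ∧ pos + 5 < (rest.length : Int) then
          match pvDecodeU (PySem.List.slice rest (some (pos + 2)) (some (pos + 6))) with
          | some ch => pre ++ ch :: unescapeLoopB (PySem.List.slice rest (some (pos + 6)) none)
          | none => pre ++ '\\' :: unescapeLoopB (PySem.List.slice rest (some (pos + 1)) none)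
        else pre ++ '\\' :: unescapeLoopB (PySem.List.slice rest (some (pos + 1)) none)
  termination_by rest.length
  decreasing_by
    all_goals
      simp only [not_or] at h
      obtain ⟨hA, hB⟩ := h
      have h1 := PySem.Chars.neg_one_le_find rest ['\\']
      have hne : ['\\'] <:+: rest :=
        (PySem.Chars.find_nonneg_iff rest ['\\']).mp (by omega)
      have hlen : 1 ≤ rest.length := by simpa using hne.sublist.length_le
      simp only [PySem.List.slice_some_none, List.length_drop, PySem.List.clampIdx]
      split_ifs <;> omega

def unescape_value_py_alt (value : String) : String :=
  String.mk (PySem.Chars.strip (unescapeLoopB value.toList))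

-- ===== PRECONDITION & SPEC =====

-- true iff the suffix starts with a \uXXXX escape whose value is a UTF-16 surrogate
def pvIsSurrogateEsc (tl : List Char) : Bool :=
  match tl with
  | '\\' :: 'u' :: rest =>
    (match PySem.Int.ofCharsBase? (rest.take 4) 16 with
     | some v => decide (4 ≤ rest.length) && decide (55296 ≤ v ∧ v ≤ 57343)
     | none => false)
  | _ => false

-- Pre_ excludes values containing a \uXXXX escape whose hex value is a UTF-16 surrogate
-- (0xD800–0xDFFF): Python's chr returns a lone surrogate there, which is not a Unicode
-- scalar value and so not representable as a Lean Char/String; both Pythons agree there.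
def Pre_unescape_value_py (value : String) : Prop :=
  ((List.range value.toList.length).all
    (fun j => ! pvIsSurrogateEsc (value.toList.drop j))) = true
instance (value : String) : Decidable (Pre_unescape_value_py value) := by
  unfold Pre_unescape_value_py; infer_instance

def pvWitness_unescape_value_py : String := "a\\u0041 \\n\\q"

def Spec_unescape_value_py (value : String) (out : String) : Prop := out = unescape_value_py_alt value
instance (value : String) (out : String) : Decidable (Spec_unescape_value_py value out) := by unfold Spec_unescape_value_py; infer_instance

-- ===== CLAIM (what is proved, stated in full; the proofs are below) =====
def Claim_equal_unescape_value_py : Prop := ∀ (value : String), Dom_unescape_value_py value → Pre_unescape_value_py value → Spec_unescape_value_py value (unescape_value_py value)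

-- ===== LEMMAS AND PROOFS =====

lemma pvLoopA_copy (pre rest : List Char) (h : '\\' ∉ pre) :
    unescapeLoopA (pre ++ rest) = pre ++ unescapeLoopA rest := by
  induction pre with
  | nil => simp
  | cons c pr ih =>
    have hc : ¬ c = '\\' := fun e => h (by simp [e])
    have hpr : '\\' ∉ pr := fun m => h (List.mem_cons_of_mem _ m)
    rw [List.cons_append]
    cases hq : pr ++ rest with
    | nil =>
      have h1 : pr = [] := (List.append_eq_nil_iff.mp hq).1
      have h2 : rest = [] := (List.append_eq_nil_iff.mp hq).2
      subst h1; subst h2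
      rw [unescapeLoopA.eq_3, if_neg hc, unescapeLoopA.eq_1]
      simp
    | cons a t => rw [unescapeLoopA.eq_2, if_neg hc, ← hq, ih hpr]; simp

lemma pvLoopA_id (cs : List Char) (h : '\\' ∉ cs) : unescapeLoopA cs = cs := by
  have := pvLoopA_copy cs [] h
  simpa [unescapeLoopA] using this

-- A's elif ladder, phrased through B's dict
lemma pvLoopA_esc (nxt : Char) (tl : List Char) :
    unescapeLoopA ('\\' :: nxt :: tl) =
      match PySem.Dict.get? pvSimple nxt with
      | some rep => rep :: unescapeLoopA tl
      | none =>
        if nxt = 'u' ∧ 4 ≤ tl.length then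
          match pvDecodeU (tl.take 4) with
          | some ch => ch :: unescapeLoopA (tl.drop 4)
          | none => '\\' :: unescapeLoopA (nxt :: tl)
        else '\\' :: unescapeLoopA (nxt :: tl)
      := by
  rw [unescapeLoopA.eq_2, if_pos rfl]
  by_cases h1 : nxt = 'n'
  · subst h1; rw [show PySem.Dict.get? pvSimple 'n' = some '\n' from by decide]; simp
  by_cases h2 : nxt = 'r'
  · subst h2; rw [show PySem.Dict.get? pvSimple 'r' = some '\r' from by decide]; simp
  by_cases h3 : nxt = 't'
  · subst h3; rw [show PySem.Dict.get? pvSimple 't' = some '\t' from by decide]; simp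
  by_cases h4 : nxt = 'f'
  · subst h4; rw [show PySem.Dict.get? pvSimple 'f' = some (Char.ofNat 12) from by decide]; simp
  by_cases h5 : nxt = '\\'
  · subst h5; rw [show PySem.Dict.get? pvSimple '\\' = some '\\' from by decide]; simp
  by_cases h6 : nxt = ':'
  · subst h6; rw [show PySem.Dict.get? pvSimple ':' = some ':' from by decide]; simp
  by_cases h7 : nxt = '='
  · subst h7; rw [show PySem.Dict.get? pvSimple '=' = some '=' from by decide]; simp
  have hg : PySem.Dict.get? pvSimple nxt = none := by
    have e : pvSimple = ⟨[('n', '\n'), ('r', '\r'), ('t', '\t'), ('f', Char.ofNat 12),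
        ('\\', '\\'), (':', ':'), ('=', '=')]⟩ := by decide
    rw [e]
    simp [PySem.Dict.get?, beq_iff_eq, Ne.symm h1, Ne.symm h2, Ne.symm h3, Ne.symm h4,
      Ne.symm h5, Ne.symm h6, Ne.symm h7]
  rw [hg, if_neg h1, if_neg h2, if_neg h3, if_neg h4, if_neg h5, if_neg h6, if_neg h7]

lemma pvLoopB_eq_loopA (n : Nat) : ∀ cs : List Char, cs.length ≤ n →
    unescapeLoopB cs = unescapeLoopA cs := by
  induction n with
  | zero =>
    intro cs hl
    have hcs : cs = [] := List.eq_nil_of_length_eq_zero (Nat.le_zero.mp hl)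
    subst hcs
    rw [unescapeLoopB, unescapeLoopA.eq_1]
    rw [dif_pos (Or.inl (by decide))]
  | succ n ih =>
    intro cs hl
    rw [unescapeLoopB]
    by_cases hneg : PySem.Chars.find cs ['\\'] = -1
    · rw [dif_pos (Or.inl hneg)]
      have hnb : '\\' ∉ cs := by
        intro hm
        obtain ⟨s, t, rfl⟩ := List.append_of_mem hm
        exact (PySem.Chars.find_eq_neg_one_iff _ _).mp hneg ⟨s, t, by simp⟩
      rw [pvLoopA_id cs hnb]
    · have hm1 := PySem.Chars.neg_one_le_find cs ['\\']
      have h0 : 0 ≤ PySem.Chars.find cs ['\\'] := by omega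
      obtain ⟨hprefix, hmin⟩ := PySem.Chars.find_spec (s := cs) (sub := ['\\']) h0
      set p := (PySem.Chars.find cs ['\\']).toNat with hp
      have hf : PySem.Chars.find cs ['\\'] = (p : Int) := by omega
      have hplen : p < cs.length := by
        have h2 := hprefix.length_le
        simp only [List.length_cons, List.length_nil, List.length_drop] at h2
        omega
      have hgetp : cs.drop p = '\\' :: cs.drop (p + 1) := by
        have hd := List.drop_eq_getElem_cons hplen
        obtain ⟨t, ht⟩ := hprefix
        rw [hd] at ht ⊢
        simp only [List.singleton_append, List.cons.injEq] at ht
        rw [ht.1]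
      have hnb : '\\' ∉ cs.take p := by
        intro hm
        obtain ⟨i, hi, hgi⟩ := List.mem_iff_getElem.mp hm
        have hip : i < p := by simp at hi; omega
        have hic : i < cs.length := lt_trans hip hplen
        rw [List.getElem_take] at hgi
        refine hmin i hip ⟨cs.drop (i + 1), ?_⟩
        rw [List.drop_eq_getElem_cons hic, hgi]
        simp
      by_cases hlast : PySem.Chars.find cs ['\\'] = (cs.length : Int) - 1
      · rw [dif_pos (Or.inr hlast)]
        have hdrop : cs.drop p = ['\\'] := by
          rw [hgetp, List.drop_eq_nil_of_le (by omega)]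
        conv_rhs => rw [← List.take_append_drop p cs]
        rw [pvLoopA_copy _ _ hnb, hdrop, unescapeLoopA.eq_3, if_pos rfl, unescapeLoopA.eq_1]
        conv_lhs => rw [← List.take_append_drop p cs, hdrop]
      · rw [dif_neg (by tauto)]
        have hp1 : p + 1 < cs.length := by omega
        have hdrop1 : cs.drop (p + 1) = cs[p + 1] :: cs.drop (p + 2) :=
          List.drop_eq_getElem_cons hp1
        have hget : PySem.List.pyGet? cs (PySem.Chars.find cs ['\\'] + 1) = some cs[p + 1] := by
          rw [hf, show ((p : Int) + 1) = ((p + 1 : Nat) : Int) from by push_cast; ring,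
            PySem.List.pyGet?_natCast]
          simp [List.getElem?_eq_getElem hp1]
        rw [hget]
        have hpre : PySem.List.slice cs none (some (PySem.Chars.find cs ['\\'])) = cs.take p :=
          PySem.List.slice_to cs h0
        have hs1 : PySem.List.slice cs (some (PySem.Chars.find cs ['\\'] + 1)) none
            = cs[p + 1] :: cs.drop (p + 2) := by
          rw [PySem.List.slice_from cs (by omega),
            show (PySem.Chars.find cs ['\\'] + 1).toNat = p + 1 from by omega, hdrop1]
        have hs2 : PySem.List.slice cs (some (PySem.Chars.find cs ['\\'] + 2)) none
            = cs.drop (p + 2) := by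
          rw [PySem.List.slice_from cs (by omega),
            show (PySem.Chars.find cs ['\\'] + 2).toNat = p + 2 from by omega]
        have hs6 : PySem.List.slice cs (some (PySem.Chars.find cs ['\\'] + 2))
            (some (PySem.Chars.find cs ['\\'] + 6)) = (cs.drop (p + 2)).take 4 := by
          rw [PySem.List.slice_toNat cs (by omega) (by omega),
            show (PySem.Chars.find cs ['\\'] + 2).toNat = p + 2 from by omega,
            show (PySem.Chars.find cs ['\\'] + 6).toNat = p + 6 from by omega]
          congr 1
          omega
        have hs6' : PySem.List.slice cs (some (PySem.Chars.find cs ['\\'] + 6)) none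
            = (cs.drop (p + 2)).drop 4 := by
          rw [PySem.List.slice_from cs (by omega),
            show (PySem.Chars.find cs ['\\'] + 6).toNat = p + 6 from by omega,
            List.drop_drop]
        have hcs : unescapeLoopA cs
            = cs.take p ++ unescapeLoopA ('\\' :: cs[p + 1] :: cs.drop (p + 2)) := by
          conv_lhs => rw [← List.take_append_drop p cs]
          rw [pvLoopA_copy _ _ hnb, hgetp, hdrop1]
        rw [hcs, pvLoopA_esc, hpre]
        cases hdict : PySem.Dict.get? pvSimple cs[p + 1] with
        | some rep =>
          simp only [hdict]
          rw [hs2, ih (cs.drop (p + 2)) (by simp only [List.length_drop]; omega)]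
        | none =>
          simp only [hdict]
          have hcond : (cs[p + 1] = 'u' ∧ PySem.Chars.find cs ['\\'] + 5 < (cs.length : Int))
              ↔ (cs[p + 1] = 'u' ∧ 4 ≤ (cs.drop (p + 2)).length) := by
            simp only [List.length_drop]
            constructor
            · rintro ⟨a, b⟩; exact ⟨a, by omega⟩
            · rintro ⟨a, b⟩; exact ⟨a, by omega⟩
          by_cases hu : cs[p + 1] = 'u' ∧ 4 ≤ (cs.drop (p + 2)).length
          · rw [if_pos (hcond.mpr hu), if_pos hu, hs6]
            cases hdec : pvDecodeU ((cs.drop (p + 2)).take 4) with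
            | some ch =>
              rw [hs6', ih ((cs.drop (p + 2)).drop 4) (by simp only [List.length_drop]; omega)]
            | none =>
              rw [hs1, ih (cs[p + 1] :: cs.drop (p + 2))
                (by simp only [List.length_cons, List.length_drop]; omega)]
          · rw [if_neg (fun hc => hu (hcond.mp hc)), if_neg hu, hs1,
              ih (cs[p + 1] :: cs.drop (p + 2))
                (by simp only [List.length_cons, List.length_drop]; omega)]

-- ===== VERDICT (by name: the statement is the Claim_ definition above) =====
theorem unescape_value_py_spec : Claim_equal_unescape_value_py := by
  intro value _ _
  unfold Spec_unescape_value_py unescape_value_py unescape_value_py_alt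
  rw [pvLoopB_eq_loopA value.toList.length value.toList le_rfl]
  split
  · next h =>
      rw [h]
      have h0 : unescapeLoopA ([] : List Char) = [] := by simp [unescapeLoopA]
      rw [h0]
      rfl
  · rfl
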